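-- pv_equiv track=rewrite | github.com/airus-maqbool/FYP_backend | app/services/meeting_compiler.py | _format_people
-- ===== SOURCE A (Python) =====
-- def _format_people(people: list) -> str:
--     """
--     Format people list into:
--         David (Sales, TaskMaster), Sarah (Office Manager, ABC Company)
--     Handles missing role or company gracefully.
--     """
--     parts = []
--     for p in people:
--         name    = p.get("name", "Unknown")
--         role    = p.get("role")
--         company = p.get("company")
--
--         if role and company:
--             parts.append(f"{name} ({role}, {company})")
--         elif role:
--             parts.append(f"{name} ({role})")
--         elif company:
--             parts.append(f"{name} ({company})")
--         else:
--             parts.append(name)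
--
--     return ",\n ".join(parts)
-- ===== SOURCE B (Python) =====
-- def _format_people(people: list) -> str:
--     def _entry(p):
--         name = p.get("name", "Unknown")
--         suffix = ""
--         role = p.get("role")
--         if role:
--             suffix = f"{role}"
--         company = p.get("company")
--         if company:
--             suffix = f"{suffix}, {company}" if suffix else f"{company}"
--         return f"{name} ({suffix})" if suffix else name
--
--     def _rec(ps):
--         if not ps:
--             return ""
--         head = _entry(ps[0])
--         rest = ps[1:]
--         return head if not rest else head + ",\n " + _rec(rest)
--
--     return _rec(people)
-- ===== Notes on version B (the rewrite author's own statement) =====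
-- stated objective: alternative
-- what changed: Replaces A's four-way if/elif branch and parts-list-plus-join with a suffix accumulator built incrementally (role, then company appended with ', ') per person, and a recursion over the list that concatenates entries with ',\n ' directly, with no intermediate parts list and no join.
import Mathlib
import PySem

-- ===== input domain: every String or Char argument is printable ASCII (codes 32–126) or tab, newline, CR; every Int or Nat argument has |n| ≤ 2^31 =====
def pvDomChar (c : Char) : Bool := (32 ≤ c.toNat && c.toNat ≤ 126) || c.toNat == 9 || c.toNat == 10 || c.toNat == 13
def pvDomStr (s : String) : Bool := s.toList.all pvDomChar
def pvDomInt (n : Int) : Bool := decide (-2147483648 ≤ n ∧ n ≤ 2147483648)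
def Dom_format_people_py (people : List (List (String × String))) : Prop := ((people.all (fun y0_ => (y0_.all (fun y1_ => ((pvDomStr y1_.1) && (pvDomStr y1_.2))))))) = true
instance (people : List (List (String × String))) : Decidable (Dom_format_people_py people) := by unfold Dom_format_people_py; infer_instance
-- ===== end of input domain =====

-- B replaces A's four-way if/elif branches plus parts-list/join with an incrementally
-- built suffix per person and a direct recursion that inserts ",\n " between entries
-- (objective: alternative decomposition, no intermediate parts list).

-- dict.get on an association list (first match, per the type convention)
def pvGet (p : List (String × String)) (k : String) : Option String :=
  (p.find? (fun kv => kv.1 == k)).map (·.2)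

def pvGetD (p : List (String × String)) (k dflt : String) : String :=
  (pvGet p k).getD dflt

-- Python truthiness of an Optional[str]: None and "" are falsy.
def pvTruthyOpt (o : Option String) : Bool :=
  match o with
  | some s => !(s == "")
  | none => false

-- ===== PORT A =====
def format_people_py (people : List (List (String × String))) : String :=
  let parts := people.foldl (fun parts p =>
    let name := pvGetD p "name" "Unknown"
    let role := pvGet p "role"
    let company := pvGet p "company"
    if pvTruthyOpt role && pvTruthyOpt company then
      parts ++ [name ++ " (" ++ role.getD "" ++ ", " ++ company.getD "" ++ ")"]
    else if pvTruthyOpt role then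
      parts ++ [name ++ " (" ++ role.getD "" ++ ")"]
    else if pvTruthyOpt company then
      parts ++ [name ++ " (" ++ company.getD "" ++ ")"]
    else
      parts ++ [name]) []
  PySem.Str.join ",\n " parts

-- ===== PORT B =====
-- one person: suffix accumulator (role first, then company appended with ", ")
def pvEntryAlt (p : List (String × String)) : String :=
  let name := pvGetD p "name" "Unknown"
  let suffix := ""
  let role := pvGet p "role"
  let suffix := if pvTruthyOpt role then role.getD "" else suffix
  let company := pvGet p "company"
  let suffix := if pvTruthyOpt company then
      (if suffix == "" then company.getD "" else suffix ++ ", " ++ company.getD "")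
    else suffix
  if suffix == "" then name else name ++ " (" ++ suffix ++ ")"

def format_people_py_alt : List (List (String × String)) → String
  | [] => ""
  | p :: rest =>
    let head := pvEntryAlt p
    match rest with
    | [] => head
    | _ :: _ => head ++ ",\n " ++ format_people_py_alt rest

-- ===== PRECONDITION & SPEC =====
def Spec_format_people_py (people : List (List (String × String))) (out : String) : Prop := out = format_people_py_alt people
instance (people : List (List (String × String))) (out : String) : Decidable (Spec_format_people_py people out) := by unfold Spec_format_people_py; infer_instance

-- ===== CLAIM (what is proved, stated in full; the proofs are below) =====
def Claim_equal_format_people_py : Prop := ∀ (people : List (List (String × String))), Dom_format_people_py people → Spec_format_people_py people (format_people_py people)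

-- ===== LEMMAS AND PROOFS =====

-- what A appends for one person
def pvEntryA (p : List (String × String)) : String :=
  let name := pvGetD p "name" "Unknown"
  let role := pvGet p "role"
  let company := pvGet p "company"
  if pvTruthyOpt role && pvTruthyOpt company then
    name ++ " (" ++ role.getD "" ++ ", " ++ company.getD "" ++ ")"
  else if pvTruthyOpt role then name ++ " (" ++ role.getD "" ++ ")"
  else if pvTruthyOpt company then name ++ " (" ++ company.getD "" ++ ")"
  else name

lemma pv_entry_eq (p : List (String × String)) : pvEntryA p = pvEntryAlt p := by
  unfold pvEntryA pvEntryAlt pvTruthyOpt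
  cases hr : pvGet p "role" with
  | none =>
    cases hc : pvGet p "company" with
    | none => simp
    | some c =>
      by_cases hce : c = ""
      · subst hce; simp
      · have hcb : (c == "") = false := beq_eq_false_iff_ne.mpr hce
        simp [hcb]
  | some r =>
    cases hc : pvGet p "company" with
    | none =>
      by_cases hre : r = ""
      · subst hre; simp
      · have hrb : (r == "") = false := beq_eq_false_iff_ne.mpr hre
        simp [hrb]
    | some c =>
      by_cases hre : r = "" <;> by_cases hce : c = ""
      · subst hre; subst hce; simp
      · subst hre
        have hcb : (c == "") = false := beq_eq_false_iff_ne.mpr hce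
        simp [hcb]
      · subst hce
        have hrb : (r == "") = false := beq_eq_false_iff_ne.mpr hre
        simp [hrb]
      · have hrb : (r == "") = false := beq_eq_false_iff_ne.mpr hre
        have hcb : (c == "") = false := beq_eq_false_iff_ne.mpr hce
        simp [hrb, hcb, String.append_assoc]

lemma pv_foldl_entries (people : List (List (String × String))) (acc : List String) :
    people.foldl (fun parts p =>
      let name := pvGetD p "name" "Unknown"
      let role := pvGet p "role"
      let company := pvGet p "company"
      if pvTruthyOpt role && pvTruthyOpt company then
        parts ++ [name ++ " (" ++ role.getD "" ++ ", " ++ company.getD "" ++ ")"]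
      else if pvTruthyOpt role then
        parts ++ [name ++ " (" ++ role.getD "" ++ ")"]
      else if pvTruthyOpt company then
        parts ++ [name ++ " (" ++ company.getD "" ++ ")"]
      else
        parts ++ [name]) acc = acc ++ people.map pvEntryA := by
  induction people generalizing acc with
  | nil => simp
  | cons p rest ih =>
    rw [List.foldl_cons, List.map_cons, ih]
    have hstep : (let name := pvGetD p "name" "Unknown"
        let role := pvGet p "role"
        let company := pvGet p "company"
        if pvTruthyOpt role && pvTruthyOpt company then
          acc ++ [name ++ " (" ++ role.getD "" ++ ", " ++ company.getD "" ++ ")"]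
        else if pvTruthyOpt role then
          acc ++ [name ++ " (" ++ role.getD "" ++ ")"]
        else if pvTruthyOpt company then
          acc ++ [name ++ " (" ++ company.getD "" ++ ")"]
        else
          acc ++ [name]) = acc ++ [pvEntryA p] := by
      unfold pvEntryA
      dsimp only
      split_ifs <;> rfl
    rw [hstep, List.append_assoc]
    rfl

lemma pv_join_cons_cons (a b : String) (t : List String) :
    PySem.Str.join ",\n " (a :: b :: t) = a ++ ",\n " ++ PySem.Str.join ",\n " (b :: t) := by
  simp [PySem.Str.join, PySem.Chars.join_cons_cons,
    ← String.toList_inj, String.toList_append, String.toList_ofList]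

-- B's recursion computes A's join over the per-person entries
lemma pv_join_map_eq_alt (people : List (List (String × String))) :
    PySem.Str.join ",\n " (people.map pvEntryA) = format_people_py_alt people := by
  induction people with
  | nil => simp [format_people_py_alt, PySem.Str.join, PySem.Chars.join_nil]
  | cons p rest ih =>
    cases rest with
    | nil =>
      simp [format_people_py_alt, PySem.Str.join, PySem.Chars.join_singleton, pv_entry_eq]
    | cons q t =>
      simp only [List.map_cons]
      rw [pv_join_cons_cons, ← List.map_cons, ih, pv_entry_eq]
      rfl

-- ===== VERDICT (by name: the statement is the Claim_ definition above) =====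
theorem format_people_py_spec : Claim_equal_format_people_py := by
  intro people _
  unfold Spec_format_people_py format_people_py
  rw [pv_foldl_entries, List.nil_append, pv_join_map_eq_alt]
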